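-- pv_equiv track=rewrite | github.com/redhat-performance/cloud-governance | cloud_governance/policy/aws/cost_over_usage.py | get_user_used_instances
-- ===== SOURCE A (Python) =====
-- def get_user_used_instances(user_used_list: list):
--     """
--     This method returns user used instances group by region
--     @return:
--     """
--     region_resources = {}
--     if isinstance(user_used_list, list):
--         for instance in user_used_list:
--             if instance:
--                 if instance['Region'] in region_resources:
--                     region_resources[instance['Region']].append(instance)
--                 else:
--                     region_resources[instance['Region']] = [instance]
--     return region_resources
-- ===== SOURCE B (Python) =====
-- def get_user_used_instances(user_used_list: list):
--     """Two-pass grouping: collect the regions in first-occurrence order, then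
--     build each region's bucket with a single filter per region."""
--     if not isinstance(user_used_list, list):
--         return {}
--     items = [instance for instance in user_used_list if instance]
--     regions = []
--     for instance in items:
--         region = instance['Region']
--         if region not in regions:
--             regions.append(region)
--     return {region: [instance for instance in items if instance['Region'] == region]
--             for region in regions}
-- ===== Notes on version B (the rewrite author's own statement) =====
-- stated objective: alternative
-- what changed: Replaces the incremental dict-bucket loop (membership test + in-place append / fresh-key insert per element) with a two-pass scheme: one pass collects the distinct regions in first-occurrence order, then a dict comprehension builds each region's bucket by filtering the non-falsy items.
import Mathlib
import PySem

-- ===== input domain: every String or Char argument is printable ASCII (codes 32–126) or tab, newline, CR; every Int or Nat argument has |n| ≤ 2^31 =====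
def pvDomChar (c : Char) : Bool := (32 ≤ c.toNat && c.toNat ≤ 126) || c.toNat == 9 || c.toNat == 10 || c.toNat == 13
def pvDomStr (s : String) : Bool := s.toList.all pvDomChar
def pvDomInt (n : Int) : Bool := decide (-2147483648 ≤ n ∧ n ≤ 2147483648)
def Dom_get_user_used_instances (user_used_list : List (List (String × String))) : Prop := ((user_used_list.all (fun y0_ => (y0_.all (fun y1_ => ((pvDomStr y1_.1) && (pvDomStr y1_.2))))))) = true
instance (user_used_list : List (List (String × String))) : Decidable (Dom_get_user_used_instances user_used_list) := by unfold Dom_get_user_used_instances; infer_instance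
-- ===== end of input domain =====

-- B replaces A's incremental dict-bucket loop by a two-pass scheme (collect the distinct
-- regions in first-occurrence order, then filter out each region's bucket); alternative
-- decomposition, not claimed faster.

-- ===== PORT A =====
-- instance['Region']: first-match lookup in the association list; none = KeyError (excluded by Pre_).
def pyRegionOf (instance_ : List (String × String)) : Option String :=
  List.lookup "Region" instance_

def get_user_used_instances (user_used_list : List (List (String × String))) : List (String × List (List (String × String))) :=
  user_used_list.foldl (fun region_resources instance_ =>
    if instance_.isEmpty then region_resources
    else
      match pyRegionOf instance_ with
      | none => region_resources   -- KeyError in Python; outside Pre_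
      | some r =>
        if region_resources.any (fun p => p.1 == r) then
          region_resources.map (fun p => if p.1 == r then (p.1, p.2 ++ [instance_]) else p)
        else
          region_resources ++ [(r, [instance_])]) []

-- ===== PORT B =====
def get_user_used_instances_alt (user_used_list : List (List (String × String))) : List (String × List (List (String × String))) :=
  let items := user_used_list.filter (fun instance_ => !instance_.isEmpty)
  let regions := items.foldl (fun acc instance_ =>
      match pyRegionOf instance_ with
      | none => acc                -- KeyError in Python; outside Pre_
      | some r => if acc.contains r then acc else acc ++ [r]) []
  regions.map (fun r => (r, items.filter (fun instance_ => pyRegionOf instance_ == some r)))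

-- ===== PRECONDITION & SPEC =====
-- Pre_ excludes exactly the inputs where Python raises KeyError: a non-empty instance without a 'Region' key.
def Pre_get_user_used_instances (user_used_list : List (List (String × String))) : Prop :=
  ∀ instance_ ∈ user_used_list, instance_ ≠ [] → (pyRegionOf instance_).isSome
instance (user_used_list : List (List (String × String))) : Decidable (Pre_get_user_used_instances user_used_list) := by unfold Pre_get_user_used_instances; infer_instance

def pvWitness_get_user_used_instances : (List (List (String × String))) :=
  [[("Region", "us-east-1"), ("Id", "i-1")], [], [("Region", "us-west-2")], [("Region", "us-east-1")]]

def Spec_get_user_used_instances (user_used_list : List (List (String × String))) (out : List (String × List (List (String × String)))) : Prop := out = get_user_used_instances_alt user_used_list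
instance (user_used_list : List (List (String × String))) (out : List (String × List (List (String × String)))) : Decidable (Spec_get_user_used_instances user_used_list out) := by unfold Spec_get_user_used_instances; infer_instance

-- ===== CLAIM (what is proved, stated in full; the proofs are below) =====
def Claim_equal_get_user_used_instances : Prop := ∀ (user_used_list : List (List (String × String))), Dom_get_user_used_instances user_used_list → Pre_get_user_used_instances user_used_list → Spec_get_user_used_instances user_used_list (get_user_used_instances user_used_list)

-- ===== LEMMAS AND PROOFS =====

-- A's fold step, restricted to non-empty instances
def stepA (rr : List (String × List (List (String × String)))) (i : List (String × String)) : List (String × List (List (String × String))) :=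
  match pyRegionOf i with
  | none => rr
  | some r =>
    if rr.any (fun p => p.1 == r) then
      rr.map (fun p => if p.1 == r then (p.1, p.2 ++ [i]) else p)
    else rr ++ [(r, [i])]

-- distinct regions of t in first-occurrence order, skipping those already in seen
def firstOcc (seen : List String) : List (List (String × String)) → List String
  | [] => []
  | i :: t =>
    match pyRegionOf i with
    | none => firstOcc seen t
    | some r => if seen.contains r then firstOcc seen t else r :: firstOcc (seen ++ [r]) t

def grp (t : List (List (String × String))) (r : String) : List (List (String × String)) :=
  t.filter (fun i => pyRegionOf i == some r)

theorem firstOcc_not_mem_seen {t : List (List (String × String))} :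
    ∀ {seen r}, r ∈ firstOcc seen t → ¬ seen.contains r := by
  induction t with
  | nil => intro seen r h; simp [firstOcc] at h
  | cons i t ih =>
    intro seen r h
    cases hk : pyRegionOf i with
    | none => simp only [firstOcc, hk] at h; exact ih h
    | some r' =>
      simp only [firstOcc, hk] at h
      by_cases hc : seen.contains r'
      · rw [if_pos hc] at h; exact ih h
      · rw [if_neg hc] at h
        rcases List.mem_cons.mp h with h | h
        · subst h; exact hc
        · have h2 := ih h
          simp only [List.contains_eq_mem, List.mem_append, List.mem_singleton,
            decide_eq_true_eq, not_or] at h2 ⊢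
          exact h2.1

theorem grp_cons (i : List (String × String)) (t : List (List (String × String))) (r : String) :
    grp (i :: t) r = if pyRegionOf i == some r then i :: grp t r else grp t r := by
  simp [grp, List.filter]
  split <;> simp_all

-- invariant of A's loop
theorem foldl_stepA (t : List (List (String × String))) :
    ∀ acc, t.foldl stepA acc
      = acc.map (fun p => (p.1, p.2 ++ grp t p.1))
        ++ (firstOcc (acc.map (·.1)) t).map (fun r => (r, grp t r)) := by
  induction t with
  | nil => intro acc; simp [firstOcc, grp]
  | cons i t ih =>
    intro acc
    rw [List.foldl_cons]
    cases hk : pyRegionOf i with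
    | none =>
      have hA : stepA acc i = acc := by simp [stepA, hk]
      rw [hA, ih]
      simp only [firstOcc, hk]
      congr 1
      · apply List.map_congr_left; intro p _
        rw [grp_cons, hk]; simp
      · apply List.map_congr_left; intro r _
        rw [grp_cons, hk]; simp
    | some r =>
      by_cases hc : acc.any (fun p => p.1 == r)
      · -- existing key: in-place append
        have hA : stepA acc i = acc.map (fun p => if p.1 == r then (p.1, p.2 ++ [i]) else p) := by
          simp only [stepA, hk, if_pos hc]
        rw [hA, ih]
        have hkeys : (acc.map (fun p => if p.1 == r then (p.1, p.2 ++ [i]) else p)).map (·.1)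
            = acc.map (·.1) := by
          rw [List.map_map]; apply List.map_congr_left; intro p _
          by_cases h : p.1 = r <;> simp [h]
        rw [hkeys]
        have hseen : (acc.map (·.1)).contains r := by
          simp only [List.any_eq_true] at hc
          rcases hc with ⟨p, hp, hpr⟩
          simp only [List.contains_eq_mem, decide_eq_true_eq, List.mem_map]
          exact ⟨p, hp, by simpa using hpr⟩
        simp only [firstOcc, hk, if_pos hseen]
        congr 1
        · rw [List.map_map]
          apply List.map_congr_left; intro p _
          by_cases h : p.1 == r
          · have h' : p.1 = r := by simpa using h
            simp only [h, if_pos, Function.comp]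
            rw [grp_cons, hk]
            simp [h', List.append_assoc]
          · have h' : ¬ p.1 = r := by simpa using h
            simp only [h, Function.comp]
            rw [grp_cons, hk]
            simp [Ne.symm h']
        · apply List.map_congr_left; intro r' hr'
          have hne : r' ≠ r := by
            intro he; subst he
            exact (firstOcc_not_mem_seen hr') hseen
          rw [grp_cons, hk]
          simp [Ne.symm hne]
      · -- fresh key: append a new bucket
        have hA : stepA acc i = acc ++ [(r, [i])] := by
          simp only [stepA, hk, if_neg hc]
        rw [hA, ih]
        have hseen : ¬ (acc.map (·.1)).contains r := by
          simp only [List.any_eq_true] at hc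
          simp only [List.contains_eq_mem, decide_eq_true_eq, List.mem_map]
          rintro ⟨p, hp, hpr⟩
          exact hc ⟨p, hp, by simpa using hpr⟩
        simp only [firstOcc, hk, if_neg hseen]
        simp only [List.map_append, List.map_cons, List.map_nil]
        rw [List.append_assoc]
        congr 1
        · apply List.map_congr_left; intro p hp
          have hne : p.1 ≠ r := by
            intro he
            apply hseen
            simp only [List.contains_eq_mem, decide_eq_true_eq, List.mem_map]
            exact ⟨p, hp, he⟩
          rw [grp_cons, hk]
          simp [Ne.symm hne]
        · rw [List.singleton_append]
          congr 1
          · rw [grp_cons, hk]; simp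
          · apply List.map_congr_left; intro r' hr'
            have hne : r' ≠ r := by
              intro he; subst he
              have := firstOcc_not_mem_seen hr'
              simp at this
            rw [grp_cons, hk]
            simp [Ne.symm hne]

-- B's region-collection loop computes firstOcc
theorem foldl_regions (t : List (List (String × String))) :
    ∀ seen, t.foldl (fun acc i =>
        match pyRegionOf i with
        | none => acc
        | some r => if acc.contains r then acc else acc ++ [r]) seen
      = seen ++ firstOcc seen t := by
  induction t with
  | nil => intro seen; simp [firstOcc]
  | cons i t ih =>
    intro seen
    rw [List.foldl_cons]
    cases hk : pyRegionOf i with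
    | none => simp only [firstOcc, hk]; rw [ih]
    | some r =>
      by_cases hc : seen.contains r
      · simp only [firstOcc, hk, if_pos hc]; rw [ih]
      · simp only [firstOcc, hk, if_neg hc]; rw [ih]
        simp

-- A's fold over the whole list equals stepA folded over the non-empty instances
theorem foldl_filter_empty (l : List (List (String × String))) :
    ∀ acc, l.foldl (fun rr i => if i.isEmpty then rr else stepA rr i) acc
      = (l.filter (fun i => !i.isEmpty)).foldl stepA acc := by
  induction l with
  | nil => intro acc; simp
  | cons i t ih =>
    intro acc
    by_cases h : i.isEmpty
    · rw [List.foldl_cons, if_pos h, List.filter_cons_of_neg (by simp [h]), ih]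
    · rw [List.foldl_cons, if_neg h, List.filter_cons_of_pos (by simp [h]), List.foldl_cons, ih]

-- ===== VERDICT (by name: the statement is the Claim_ definition above) =====
theorem get_user_used_instances_spec : Claim_equal_get_user_used_instances := by
  intro l _ _
  unfold Spec_get_user_used_instances get_user_used_instances get_user_used_instances_alt
  have hA : l.foldl (fun region_resources instance_ =>
      if instance_.isEmpty then region_resources
      else
        match pyRegionOf instance_ with
        | none => region_resources
        | some r =>
          if region_resources.any (fun p => p.1 == r) then
            region_resources.map (fun p => if p.1 == r then (p.1, p.2 ++ [instance_]) else p)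
          else
            region_resources ++ [(r, [instance_])]) []
      = (l.filter (fun i => !i.isEmpty)).foldl stepA [] := by
    rw [← foldl_filter_empty]
    rfl
  rw [hA, foldl_stepA]
  simp only [foldl_regions, grp, List.map_nil, List.nil_append]
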